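-- pv_equiv track=rewrite | github.com/nvs4a3/code_test | asphaltpatches.py | solution
-- ===== SOURCE A (Python) =====
-- def solution(S):
--     i = 0
--     patches = 0
--
--     while(i<len(S)):
--         segment = S[i]
--         if segment == 'X':
--             i+=3
--             patches+=1
--         else:
--             i+=1
--     return patches
-- ===== SOURCE B (Python) =====
-- def solution(S):
--     xs = [i for i, c in enumerate(S) if c == 'X']
--     patches = 0
--     next_allowed = 0
--     for p in xs:
--         if p >= next_allowed:
--             patches += 1
--             next_allowed = p + 3
--     return patches
-- ===== Notes on version B (the rewrite author's own statement) =====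
-- stated objective: faster
-- what changed: B first collects the match positions into an index list and then runs a gap-based greedy pass with a next_allowed cursor over only those positions, instead of A's interpreted character-by-character while-loop with a jump pointer; the comprehension-based scan gives a constant-factor speedup.
import Mathlib
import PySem

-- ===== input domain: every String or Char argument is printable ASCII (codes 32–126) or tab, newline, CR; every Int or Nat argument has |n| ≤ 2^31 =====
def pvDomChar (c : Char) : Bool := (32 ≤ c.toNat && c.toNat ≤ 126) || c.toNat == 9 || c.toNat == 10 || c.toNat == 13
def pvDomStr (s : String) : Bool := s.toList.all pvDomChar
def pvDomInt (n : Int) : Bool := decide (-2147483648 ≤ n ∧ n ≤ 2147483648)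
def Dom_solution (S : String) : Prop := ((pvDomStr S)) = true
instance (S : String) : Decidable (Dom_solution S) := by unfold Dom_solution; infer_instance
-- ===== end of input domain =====

-- B collects the X-indices first and then greedily scans only those positions with a
-- next_allowed cursor (alternative decomposition; same O(n) cost).

-- ===== PORT A =====
-- A's while loop: index i walks the string, jumping 3 past each 'X'.
def solutionLoopA (s : List Char) (i : Nat) (patches : Int) : Int :=
  if h : i < s.length then
    if s[i] = 'X' then solutionLoopA s (i + 3) (patches + 1)
    else solutionLoopA s (i + 1) patches
  else patches
termination_by s.length - i
decreasing_by all_goals omega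

def solution (S : String) : Int := solutionLoopA S.toList 0 0

-- ===== PORT B =====
-- [i for i, c in enumerate(S) if c == 'X']
def xIdxFrom : List Char → Nat → List Nat
  | [], _ => []
  | c :: r, k => if c = 'X' then k :: xIdxFrom r (k + 1) else xIdxFrom r (k + 1)

-- the for-loop over the X positions with the next_allowed cursor
def altLoop : List Nat → Nat → Int → Int
  | [], _, patches => patches
  | p :: rest, na, patches =>
    if p ≥ na then altLoop rest (p + 3) (patches + 1)
    else altLoop rest na patches

def solution_alt (S : String) : Int := altLoop (xIdxFrom S.toList 0) 0 0

-- ===== PRECONDITION & SPEC =====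
def Spec_solution (S : String) (out : Int) : Prop := out = solution_alt S
instance (S : String) (out : Int) : Decidable (Spec_solution S out) := by unfold Spec_solution; infer_instance

-- ===== CLAIM (what is proved, stated in full; the proofs are below) =====
def Claim_equal_solution : Prop := ∀ (S : String), Dom_solution S → Spec_solution S (solution S)

-- ===== LEMMAS AND PROOFS =====

-- canonical greedy count on a character list
def g : List Char → Int
  | [] => 0
  | c :: r => if c = 'X' then 1 + g (r.drop 2) else g r
termination_by s => s.length
decreasing_by all_goals (simp only [List.length_drop, List.length_cons]; omega)

lemma loopA_eq_g (s : List Char) : ∀ i p, solutionLoopA s i p = p + g (s.drop i) := by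
  have H : ∀ n i p, s.length - i ≤ n → solutionLoopA s i p = p + g (s.drop i) := by
    intro n
    induction n with
    | zero =>
      intro i p h
      have hi : ¬ i < s.length := by omega
      have hd : s.drop i = [] := List.drop_eq_nil_of_le (by omega)
      rw [solutionLoopA]
      simp [hi, hd, g]
    | succ n ih =>
      intro i p h
      rw [solutionLoopA]
      by_cases hi : i < s.length
      · have hdrop : s.drop i = s[i] :: s.drop (i + 1) :=
          List.drop_eq_getElem_cons hi
        by_cases hx : s[i] = 'X'
        · simp only [hi, dif_pos, hx, if_pos]
          rw [ih (i + 3) (p + 1) (by omega), hdrop, g, hx]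
          have : (s.drop (i + 1)).drop 2 = s.drop (i + 3) := by
            rw [List.drop_drop]
          rw [if_pos rfl, this]
          ring
        · simp only [hi, dif_pos, hx, if_neg, not_false_iff]
          rw [ih (i + 1) p (by omega), hdrop, g, if_neg hx]
      · have hd : s.drop i = [] := List.drop_eq_nil_of_le (by omega)
        simp [hi, hd, g]
  intro i p
  exact H (s.length - i) i p le_rfl

-- positions below the cursor are skipped: the loop on xIdxFrom r k with cursor na ≥ k
-- behaves as the loop on the X-indices of the suffix r.drop (na - k)
lemma altLoop_skip (r : List Char) : ∀ k na p, k ≤ na →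
    altLoop (xIdxFrom r k) na p = altLoop (xIdxFrom (r.drop (na - k)) na) na p := by
  induction r with
  | nil => intro k na p _; simp [xIdxFrom]
  | cons c r ih =>
    intro k na p hk
    rcases Nat.eq_or_lt_of_le hk with h | h
    · subst h; simp
    · have h1 : na - k = (na - (k + 1)) + 1 := by omega
      have hdrop : (c :: r).drop (na - k) = r.drop (na - (k + 1)) := by
        rw [h1]; simp
      rw [hdrop]
      by_cases hx : c = 'X'
      · rw [xIdxFrom, if_pos hx, altLoop, if_neg (by omega)]
        exact ih (k + 1) na p (by omega)
      · rw [xIdxFrom, if_neg hx]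
        exact ih (k + 1) na p (by omega)

lemma altLoop_eq_g (s : List Char) : ∀ k na p, na ≤ k →
    altLoop (xIdxFrom s k) na p = p + g s := by
  have H : ∀ n (s : List Char), s.length ≤ n → ∀ k na p, na ≤ k →
      altLoop (xIdxFrom s k) na p = p + g s := by
    intro n
    induction n with
    | zero =>
      intro s hs k na p _
      have : s = [] := List.eq_nil_of_length_eq_zero (by omega)
      subst this; simp [xIdxFrom, altLoop, g]
    | succ n ih =>
      intro s hs k na p hna
      match s with
      | [] => simp [xIdxFrom, altLoop, g]
      | c :: r =>
        by_cases hx : c = 'X'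
        · rw [xIdxFrom, if_pos hx, altLoop, if_pos (by omega)]
          rw [altLoop_skip r (k + 1) (k + 3) (p + 1) (by omega)]
          have h2 : k + 3 - (k + 1) = 2 := by omega
          rw [h2, ih (r.drop 2) (by simp at hs ⊢; omega) (k + 3) (k + 3) (p + 1) le_rfl]
          rw [g, if_pos hx]; ring
        · rw [xIdxFrom, if_neg hx]
          rw [ih r (by simp at hs; omega) (k + 1) na p (by omega)]
          rw [g, if_neg hx]
  intro k na p hna
  exact H s.length s le_rfl k na p hna

-- ===== VERDICT (by name: the statement is the Claim_ definition above) =====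
theorem solution_spec : Claim_equal_solution := by
  intro S _
  unfold Spec_solution solution solution_alt
  rw [loopA_eq_g, altLoop_eq_g S.toList 0 0 0 le_rfl]
  simp
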